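-- pv_equiv track=rewrite | github.com/davibrilhante/reliability-optimization | optimization.py | handover_detection
-- ===== SOURCE A (Python) =====
-- def handover_detection(_vars):
--     handovers = []
--     for p,n1,t1 in _vars:
--         for q,n2,t2 in _vars:
--             if p!=q and n1==n2 and t2 > t1:
--                 n = n1
--                 handovers.append([p,q,n,t1,t2])
--
--     return handovers
-- ===== SOURCE B (Python) =====
-- def handover_detection(_vars):
--     # group candidate (q, t2) partners by their n so the inner scan only
--     # visits entries with matching n, in original order
--     groups = {}
--     for q, n, t in _vars:
--         groups.setdefault(n, []).append((q, t))
--     handovers = []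
--     for p, n1, t1 in _vars:
--         for q, t2 in groups[n1]:
--             if p != q and t2 > t1:
--                 handovers.append([p, q, n1, t1, t2])
--     return handovers
-- ===== Notes on version B (the rewrite author's own statement) =====
-- stated objective: faster
-- what changed: B first groups entries by n in a dict, then scans only the matching-n group in the inner loop instead of rescanning the whole list
import Mathlib
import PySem

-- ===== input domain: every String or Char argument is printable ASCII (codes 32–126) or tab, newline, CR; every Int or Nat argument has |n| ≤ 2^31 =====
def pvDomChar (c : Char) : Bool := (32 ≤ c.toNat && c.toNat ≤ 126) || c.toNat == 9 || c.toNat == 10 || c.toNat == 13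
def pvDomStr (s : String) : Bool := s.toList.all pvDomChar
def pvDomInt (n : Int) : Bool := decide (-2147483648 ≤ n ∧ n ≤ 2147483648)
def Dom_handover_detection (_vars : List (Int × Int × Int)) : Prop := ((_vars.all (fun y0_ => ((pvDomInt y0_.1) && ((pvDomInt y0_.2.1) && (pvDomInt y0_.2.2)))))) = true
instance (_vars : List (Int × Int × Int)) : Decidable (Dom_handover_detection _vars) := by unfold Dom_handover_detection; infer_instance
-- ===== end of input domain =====

-- B groups the entries by n into a dict once, so the inner scan visits only the
-- matching-n group instead of the whole list (objective: faster).

-- ===== PORT A =====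
-- literal port of A: nested loops over the full list
def handover_detection (_vars : List (Int × Int × Int)) : List (List Int) :=
  _vars.foldl (fun acc pv =>
    _vars.foldl (fun acc2 qv =>
      if pv.1 ≠ qv.1 ∧ pv.2.1 = qv.2.1 ∧ qv.2.2 > pv.2.2
      then acc2 ++ [[pv.1, qv.1, pv.2.1, pv.2.2, qv.2.2]] else acc2) acc) []

-- ===== PORT B =====
-- groups.setdefault(n, []).append((q, t)) loop
def hoGroups (_vars : List (Int × Int × Int)) : PySem.Dict Int (List (Int × Int)) :=
  _vars.foldl (fun d v => d.insert v.2.1 (d.getD v.2.1 [] ++ [(v.1, v.2.2)])) PySem.Dict.empty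

def handover_detection_alt (_vars : List (Int × Int × Int)) : List (List Int) :=
  let groups := hoGroups _vars
  _vars.foldl (fun acc pv =>
    (groups.getD pv.2.1 []).foldl (fun acc2 qv =>
      if pv.1 ≠ qv.1 ∧ qv.2 > pv.2.2
      then acc2 ++ [[pv.1, qv.1, pv.2.1, pv.2.2, qv.2]] else acc2) acc) []

-- ===== PRECONDITION & SPEC =====
def Spec_handover_detection (_vars : List (Int × Int × Int)) (out : List (List Int)) : Prop := out = handover_detection_alt _vars
instance (_vars : List (Int × Int × Int)) (out : List (List Int)) : Decidable (Spec_handover_detection _vars out) := by unfold Spec_handover_detection; infer_instance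

-- ===== CLAIM (what is proved, stated in full; the proofs are below) =====
def Claim_equal_handover_detection : Prop := ∀ (_vars : List (Int × Int × Int)), Dom_handover_detection _vars → Spec_handover_detection _vars (handover_detection _vars)

-- ===== LEMMAS AND PROOFS =====

-- the group of n, as a filter of the original list
def hoGrp (vars : List (Int × Int × Int)) (n : Int) : List (Int × Int) :=
  vars.filterMap (fun v => if v.2.1 = n then some (v.1, v.2.2) else none)

theorem hoGrp_cons (v : Int × Int × Int) (vs : List (Int × Int × Int)) (n : Int) :
    hoGrp (v :: vs) n = (if v.2.1 = n then [(v.1, v.2.2)] else []) ++ hoGrp vs n := by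
  simp only [hoGrp, List.filterMap_cons]
  split_ifs <;> simp_all

theorem hoGroups_getD (vars : List (Int × Int × Int)) (d : PySem.Dict Int (List (Int × Int))) (n : Int) :
    (vars.foldl (fun d v => d.insert v.2.1 (d.getD v.2.1 [] ++ [(v.1, v.2.2)])) d).getD n []
      = d.getD n [] ++ hoGrp vars n := by
  induction vars generalizing d with
  | nil => simp [hoGrp]
  | cons v vs ih =>
    simp only [List.foldl_cons]
    rw [ih, PySem.Dict.getD_insert, hoGrp_cons]
    split_ifs with h1 h2 h2
    · subst h1; simp
    · exact absurd h1.symm h2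
    · exact absurd h2.symm h1
    · rfl

theorem ho_inner (vars : List (Int × Int × Int)) (p n1 t1 : Int) (acc : List (List Int)) :
    (hoGrp vars n1).foldl (fun acc2 qv =>
        if p ≠ qv.1 ∧ qv.2 > t1
        then acc2 ++ [[p, qv.1, n1, t1, qv.2]] else acc2) acc
      = vars.foldl (fun acc2 qv =>
        if p ≠ qv.1 ∧ n1 = qv.2.1 ∧ qv.2.2 > t1
        then acc2 ++ [[p, qv.1, n1, t1, qv.2.2]] else acc2) acc := by
  induction vars generalizing acc with
  | nil => simp [hoGrp]
  | cons v vs ih =>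
    rw [hoGrp_cons]
    by_cases h1 : v.2.1 = n1
    · rw [if_pos h1]
      simp only [List.cons_append, List.nil_append, List.foldl_cons]
      rw [ih]
      congr 1
      split_ifs with ha hb hc
      · rfl
      · exact absurd ⟨ha.1, h1.symm, ha.2⟩ hb
      · exact absurd ⟨hc.1, hc.2.2⟩ ha
      · rfl
    · rw [if_neg h1]
      simp only [List.nil_append, List.foldl_cons]
      rw [if_neg (fun hc => h1 hc.2.1.symm)]
      exact ih acc

theorem ho_outer (vars ws : List (Int × Int × Int)) (acc : List (List Int)) :
    ws.foldl (fun acc pv =>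
      ((hoGroups vars).getD pv.2.1 []).foldl (fun acc2 qv =>
        if pv.1 ≠ qv.1 ∧ qv.2 > pv.2.2
        then acc2 ++ [[pv.1, qv.1, pv.2.1, pv.2.2, qv.2]] else acc2) acc) acc
    = ws.foldl (fun acc pv =>
      vars.foldl (fun acc2 qv =>
        if pv.1 ≠ qv.1 ∧ pv.2.1 = qv.2.1 ∧ qv.2.2 > pv.2.2
        then acc2 ++ [[pv.1, qv.1, pv.2.1, pv.2.2, qv.2.2]] else acc2) acc) acc := by
  induction ws generalizing acc with
  | nil => rfl
  | cons w ws ih =>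
    simp only [List.foldl_cons]
    rw [show (hoGroups vars).getD w.2.1 [] = hoGrp vars w.2.1 by
          unfold hoGroups; rw [hoGroups_getD]; simp,
        ho_inner, ih]

-- ===== VERDICT (by name: the statement is the Claim_ definition above) =====
theorem handover_detection_spec : Claim_equal_handover_detection := by
  intro vars _
  unfold Spec_handover_detection handover_detection handover_detection_alt
  exact (ho_outer vars vars []).symm
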